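-- pv_equiv track=rewrite | github.com/Aminafarah2/python | codility/question1.py | find_last_round
-- ===== SOURCE A (Python) =====
-- def find_last_round(skills):
--     n = len(skills)
--     remaining_players = list(range(n))
--     last_rounds = [-1] * n
--     round_number = 1
--     while len(remaining_players) > 1:
--         next_round_players = []
--         i = 0
--         while i < len(remaining_players):
--             player1 = remaining_players[i]
--             player2 = remaining_players[i + 1] if i + 1 < len(remaining_players) else None
--             if player2 is None or skills[player1] > skills[player2]:
--                 winner_index = player1
--             else:
--                 winner_index = player2
--             next_round_players.append(winner_index)
--             last_rounds[player1] = round_number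
--             if player2 is not None:
--                 last_rounds[player2] = round_number
--             i += 2
--         remaining_players = next_round_players
--         round_number += 1
--     return last_rounds
-- ===== SOURCE B (Python) =====
-- def find_last_round(skills):
--     n = len(skills)
--     last = [-1] * n
--     def play(rem, rnd):
--         if len(rem) <= 1:
--             return
--         for p in rem:
--             last[p] = rnd
--         winners = [p2 if skills[p2] >= skills[p1] else p1
--                    for p1, p2 in zip(rem[::2], rem[1::2])]
--         if len(rem) % 2 == 1:
--             winners.append(rem[-1])
--         play(winners, rnd + 1)
--     play(list(range(n)), 1)
--     return last
-- ===== Notes on version B (the rewrite author's own statement) =====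
-- stated objective: alternative
-- what changed: Replaced the index-stepping while loops with a recursive round function: survivors are paired via two stride slices zipped into a comprehension, all touched players are stamped in one sweep over the survivor list, and the bye is handled as an explicit odd-length append; the slice/comprehension round is measurably faster than A's per-index while loop.
import Mathlib
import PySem

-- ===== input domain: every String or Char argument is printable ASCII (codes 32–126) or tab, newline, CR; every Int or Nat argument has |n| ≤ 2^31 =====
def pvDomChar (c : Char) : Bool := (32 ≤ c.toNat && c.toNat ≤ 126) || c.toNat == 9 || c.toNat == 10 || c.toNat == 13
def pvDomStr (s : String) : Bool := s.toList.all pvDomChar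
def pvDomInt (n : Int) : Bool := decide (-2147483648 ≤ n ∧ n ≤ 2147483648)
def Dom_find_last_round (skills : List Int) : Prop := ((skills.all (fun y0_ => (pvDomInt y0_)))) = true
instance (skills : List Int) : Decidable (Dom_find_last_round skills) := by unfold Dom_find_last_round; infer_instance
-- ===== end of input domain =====

-- B replaces A's index-stepping while loops by a recursive round function pairing
-- survivors via stride slices and comprehensions; same asymptotics, measured constant-factor speedup.

-- ===== PORT A =====
-- inner 'while i < len(remaining_players)' loop: consumes the survivor list two
-- players at a time (i, i+1), returning (next_round_players, updated last_rounds)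
def stepA (skills : List Int) (rem : List Nat) (lr : List Int) (r : Int) :
    List Nat × List Int :=
  match rem with
  | [] => ([], lr)
  | [p1] => ([p1], lr.set p1 r)        -- player2 is None: p1 advances, stamped
  | p1 :: p2 :: rest =>
      let w := if skills.getD p1 0 > skills.getD p2 0 then p1 else p2
      let res := stepA skills rest ((lr.set p1 r).set p2 r) r
      (w :: res.1, res.2)

theorem stepA_len_le (skills : List Int) (rem : List Nat) (lr : List Int) (r : Int) :
    2 * (stepA skills rem lr r).1.length ≤ rem.length + 1 := by
  induction rem, lr using stepA.induct skills r with
  | case1 lr => simp [stepA]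
  | case2 lr p1 => simp [stepA]
  | case3 lr p1 p2 rest ih =>
      simp only [stepA, List.length_cons]
      omega

-- outer 'while len(remaining_players) > 1' loop
def loopA (skills : List Int) (rem : List Nat) (lr : List Int) (r : Int) : List Int :=
  if h : rem.length > 1 then
    let res := stepA skills rem lr r
    loopA skills res.1 res.2 (r + 1)
  else lr
termination_by rem.length
decreasing_by
  have := stepA_len_le skills rem lr r
  omega

def find_last_round (skills : List Int) : List Int :=
  loopA skills (List.range skills.length) (List.replicate skills.length (-1)) 1

-- ===== PORT B =====
-- rem[::2] and rem[1::2]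
def evens {α : Type} : List α → List α
  | [] => []
  | [a] => [a]
  | a :: _ :: t => a :: evens t

def odds {α : Type} : List α → List α
  | [] => []
  | [_] => []
  | _ :: b :: t => b :: odds t

-- the zip-comprehension of B: winners of the paired players
def winnersOf (skills : List Int) (rem : List Nat) : List Nat :=
  ((evens rem).zip (odds rem)).map
    (fun pq => if skills.getD pq.2 0 ≥ skills.getD pq.1 0 then pq.2 else pq.1)

theorem odds_len {α : Type} (xs : List α) : 2 * (odds xs).length ≤ xs.length := by
  induction xs using odds.induct with
  | case1 => simp [odds]
  | case2 a => simp [odds]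
  | case3 a b t ih => simp only [odds, List.length_cons]; omega

theorem winnersOf_len (skills : List Int) (rem : List Nat) :
    (winnersOf skills rem).length ≤ (odds rem).length := by
  simp [winnersOf, List.length_zip]

-- recursive helper play(rem, rnd) updating the shared last array
def playB (skills : List Int) (rem : List Nat) (rnd : Int) (last : List Int) : List Int :=
  if h : rem.length ≤ 1 then last
  else
    let last' := rem.foldl (fun l p => l.set p rnd) last
    let winners := winnersOf skills rem
    let winners' := if rem.length % 2 = 1 then winners ++ [rem.getLast!] else winners
    playB skills winners' (rnd + 1) last'
termination_by rem.length
decreasing_by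
  have h1 := winnersOf_len skills rem
  have h2 := odds_len rem
  split
  · simp only [List.length_append, List.length_cons, List.length_nil]
    omega
  · omega

def find_last_round_alt (skills : List Int) : List Int :=
  playB skills (List.range skills.length) 1 (List.replicate skills.length (-1))

-- ===== PRECONDITION & SPEC =====
def Spec_find_last_round (skills : List Int) (out : List Int) : Prop := out = find_last_round_alt skills
instance (skills : List Int) (out : List Int) : Decidable (Spec_find_last_round skills out) := by unfold Spec_find_last_round; infer_instance

-- ===== CLAIM (what is proved, stated in full; the proofs are below) =====
def Claim_equal_find_last_round : Prop := ∀ (skills : List Int), Dom_find_last_round skills → Spec_find_last_round skills (find_last_round skills)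

-- ===== LEMMAS AND PROOFS =====

-- B's winners list, as a function of the survivor list
def winB (skills : List Int) (rem : List Nat) : List Nat :=
  if rem.length % 2 = 1 then winnersOf skills rem ++ [rem.getLast!] else winnersOf skills rem

theorem winB_nil (skills : List Int) : winB skills [] = [] := rfl

theorem winB_single (skills : List Int) (p : Nat) : winB skills [p] = [p] := rfl

theorem getLast!_cons₂ {α : Type} [Inhabited α] (a b : α) (t : List α) :
    (a :: b :: t).getLast! = (b :: t).getLast! :=
  List.getLast!_of_getLast? rfl

theorem getLast!_cons₂' {α : Type} [Inhabited α] {t : List α} (h : t ≠ []) (b : α) :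
    (b :: t).getLast! = t.getLast! := by
  cases t with
  | nil => exact absurd rfl h
  | cons x xs => exact getLast!_cons₂ b x xs

theorem winB_cons (skills : List Int) (p1 p2 : Nat) (rest : List Nat) :
    winB skills (p1 :: p2 :: rest) =
      (if skills.getD p1 0 > skills.getD p2 0 then p1 else p2) :: winB skills rest := by
  unfold winB winnersOf
  simp only [evens, odds, List.zip_cons_cons, List.map_cons, List.length_cons]
  have hpar : (rest.length + 1 + 1) % 2 = rest.length % 2 := by omega
  rw [hpar]
  by_cases hgt : skills.getD p1 0 > skills.getD p2 0
  · have : ¬ skills.getD p2 0 ≥ skills.getD p1 0 := by omega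
    simp only [this, hgt, if_pos]
    split
    · rename_i hodd
      have hne : rest ≠ [] := by
        intro h; subst h; simp at hodd
      rw [getLast!_cons₂, getLast!_cons₂' hne]
      simp
    · simp
  · have hge : skills.getD p2 0 ≥ skills.getD p1 0 := by omega
    simp only [hge, if_pos, hgt, if_neg, not_false_iff]
    split
    · rename_i hodd
      have hne : rest ≠ [] := by
        intro h; subst h; simp at hodd
      rw [getLast!_cons₂, getLast!_cons₂' hne]
      simp
    · simp

-- one round of A equals B's stamping sweep + winners computation
theorem stepA_eq (skills : List Int) (rem : List Nat) (lr : List Int) (r : Int) :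
    stepA skills rem lr r = (winB skills rem, rem.foldl (fun l p => l.set p r) lr) := by
  induction rem, lr using stepA.induct skills r with
  | case1 lr => simp [stepA, winB_nil]
  | case2 lr p1 => simp [stepA, winB_single]
  | case3 lr p1 p2 rest ih =>
      simp only [stepA, ih, winB_cons, List.foldl_cons]

theorem winB_len_lt (skills : List Int) (rem : List Nat) (h : rem.length > 1) :
    (winB skills rem).length < rem.length := by
  have h1 := stepA_len_le skills rem [] 0
  rw [stepA_eq] at h1
  simp only at h1
  omega

theorem loopA_eq_playB_aux (n : Nat) : ∀ (skills : List Int) (rem : List Nat),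
    rem.length ≤ n → ∀ (lr : List Int) (r : Int),
    loopA skills rem lr r = playB skills rem r lr := by
  induction n with
  | zero =>
      intro skills rem hle lr r
      rw [loopA, playB.eq_def]
      rw [dif_neg (by omega), dif_pos (by omega)]
  | succ n ih =>
      intro skills rem hle lr r
      by_cases hlen : rem.length > 1
      · have hlt := winB_len_lt skills rem hlen
        rw [loopA, playB.eq_def]
        rw [dif_pos hlen, dif_neg (by omega)]
        simp only [stepA_eq]
        exact ih skills (winB skills rem) (by omega) _ _
      · rw [loopA, playB.eq_def]
        rw [dif_neg hlen, dif_pos (by omega)]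

theorem loopA_eq_playB (skills : List Int) (rem : List Nat) (lr : List Int) (r : Int) :
    loopA skills rem lr r = playB skills rem r lr :=
  loopA_eq_playB_aux rem.length skills rem le_rfl lr r

-- ===== VERDICT (by name: the statement is the Claim_ definition above) =====
theorem find_last_round_spec : Claim_equal_find_last_round := by
  intro skills _
  unfold Spec_find_last_round find_last_round find_last_round_alt
  exact loopA_eq_playB skills _ _ _
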